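-- pv_equiv track=rewrite | github.com/heatherleaf/korpsearch | korpsearch.py | is_subquery
-- ===== SOURCE A (Python) =====
-- def is_subquery(subtemplate, subinstance, template, instance):
--     positions = sorted({pos for _, pos in template})
--     query = {(feat, pos, val) for ((feat, pos), val) in zip(template, instance)}
--     for base in positions:
--         subquery = {(feat, base+pos, val) for ((feat, pos), val) in zip(subtemplate, subinstance)}
--         if subquery.issubset(query):
--             return True
--     return False
-- ===== SOURCE B (Python) =====
-- def is_subquery(subtemplate, subinstance, template, instance):
--     cands = {pos for _, pos in template}
--     for (feat, pos), val in zip(subtemplate, subinstance):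
--         cands &= {qpos - pos for (qfeat, qpos), qval in zip(template, instance)
--                   if qfeat == feat and qval == val}
--     return bool(cands)
-- ===== Notes on version B (the rewrite author's own statement) =====
-- stated objective: alternative
-- what changed: Instead of trying each candidate base and testing set inclusion of the shifted sub-pattern, B intersects, across the sub-pattern's elements, the sets of bases that satisfy each element (computed by shifting matching query positions), and returns whether any base survives.
import Mathlib
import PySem

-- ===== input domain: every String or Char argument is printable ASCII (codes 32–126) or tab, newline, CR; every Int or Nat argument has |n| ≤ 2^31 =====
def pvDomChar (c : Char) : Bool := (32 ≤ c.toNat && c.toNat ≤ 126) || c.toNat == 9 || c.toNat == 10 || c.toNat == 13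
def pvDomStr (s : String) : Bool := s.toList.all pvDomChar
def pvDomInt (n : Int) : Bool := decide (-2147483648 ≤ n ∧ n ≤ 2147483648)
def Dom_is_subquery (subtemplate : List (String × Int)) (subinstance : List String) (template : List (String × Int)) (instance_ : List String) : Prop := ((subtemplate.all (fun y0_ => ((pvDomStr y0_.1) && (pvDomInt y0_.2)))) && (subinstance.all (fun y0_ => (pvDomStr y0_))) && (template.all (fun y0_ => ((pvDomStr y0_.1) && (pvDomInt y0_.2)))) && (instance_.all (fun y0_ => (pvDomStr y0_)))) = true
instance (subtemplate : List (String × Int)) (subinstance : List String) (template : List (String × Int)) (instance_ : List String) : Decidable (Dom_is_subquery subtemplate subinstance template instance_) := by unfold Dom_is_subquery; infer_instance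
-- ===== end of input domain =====

-- B replaces A's try-every-base subset test by intersecting, per sub-element, the set of bases it allows (alternative decomposition, same result).

-- ===== PORT A =====
def is_subquery (subtemplate : List (String × Int)) (subinstance : List String) (template : List (String × Int)) (instance_ : List String) : Bool :=
  let positions := PySem.List.sorted (PySem.Set.ofList (template.map (fun tp => tp.2))) (fun x => x) false
  let query : PySem.Set (String × Int × String) :=
    PySem.Set.ofList ((template.zip instance_).map (fun p => (p.1.1, p.1.2, p.2)))
  positions.any (fun base =>
    PySem.Set.issubset
      (PySem.Set.ofList ((subtemplate.zip subinstance).map (fun p => (p.1.1, base + p.1.2, p.2))))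
      query)

-- ===== PORT B =====
def is_subquery_alt (subtemplate : List (String × Int)) (subinstance : List String) (template : List (String × Int)) (instance_ : List String) : Bool :=
  let cands0 : PySem.Set Int := PySem.Set.ofList (template.map (fun tp => tp.2))
  let cands := (subtemplate.zip subinstance).foldl
    (fun c p => PySem.Set.inter c (PySem.Set.ofList
        (((template.zip instance_).filter (fun q => q.1.1 == p.1.1 && q.2 == p.2)).map
          (fun q => q.1.2 - p.1.2)))) cands0
  !cands.isEmpty

-- ===== PRECONDITION & SPEC =====
def Spec_is_subquery (subtemplate : List (String × Int)) (subinstance : List String) (template : List (String × Int)) (instance_ : List String) (out : Bool) : Prop := out = is_subquery_alt subtemplate subinstance template instance_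
instance (subtemplate : List (String × Int)) (subinstance : List String) (template : List (String × Int)) (instance_ : List String) (out : Bool) : Decidable (Spec_is_subquery subtemplate subinstance template instance_ out) := by unfold Spec_is_subquery; infer_instance

-- ===== CLAIM (what is proved, stated in full; the proofs are below) =====
def Claim_equal_is_subquery : Prop := ∀ (subtemplate : List (String × Int)) (subinstance : List String) (template : List (String × Int)) (instance_ : List String), Dom_is_subquery subtemplate subinstance template instance_ → Spec_is_subquery subtemplate subinstance template instance_ (is_subquery subtemplate subinstance template instance_)

-- ===== LEMMAS AND PROOFS =====

theorem foldl_inter_mem {β : Type} (l : List β) (S : β → List Int) (c0 : List Int) (b : Int) :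
    (b ∈ l.foldl (fun c p => PySem.Set.inter c (S p)) c0) ↔ (b ∈ c0 ∧ ∀ p ∈ l, b ∈ S p) := by
  induction l generalizing c0 with
  | nil => simp
  | cons hd tl ih =>
      simp only [List.foldl_cons, ih, PySem.Set.mem_inter, List.mem_cons]
      constructor
      · rintro ⟨⟨h0, hh⟩, ht⟩
        exact ⟨h0, by rintro p (rfl | hp); exact hh; exact ht p hp⟩
      · rintro ⟨h0, h⟩
        exact ⟨⟨h0, h hd (Or.inl rfl)⟩, fun p hp => h p (Or.inr hp)⟩

theorem is_subquery_eq_alt (subtemplate : List (String × Int)) (subinstance : List String) (template : List (String × Int)) (instance_ : List String) :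
    is_subquery subtemplate subinstance template instance_ = is_subquery_alt subtemplate subinstance template instance_ := by
  rw [Bool.eq_iff_iff]
  unfold is_subquery is_subquery_alt
  simp only [List.any_eq_true, PySem.List.mem_sorted, PySem.Set.mem_ofList,
    PySem.Set.issubset_iff, Bool.not_eq_eq_eq_not, Bool.not_true,
    List.isEmpty_eq_false_iff_exists_mem, foldl_inter_mem, List.mem_map, List.mem_filter]
  constructor
  · rintro ⟨base, hb, hsub⟩
    refine ⟨base, hb, fun p hp => ?_⟩
    obtain ⟨q, hq, hq2⟩ := hsub (p.1.1, base + p.1.2, p.2) ⟨p, hp, rfl⟩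
    refine ⟨q, ⟨hq, ?_⟩, ?_⟩
    · simp only [Bool.and_eq_true, beq_iff_eq]
      exact ⟨congrArg (fun t => t.1) hq2, congrArg (fun t => t.2.2) hq2⟩
    · have := congrArg (fun t => t.2.1) hq2
      simp at this; omega
  · rintro ⟨base, hb, hall⟩
    refine ⟨base, hb, fun x hx => ?_⟩
    obtain ⟨p, hp, rfl⟩ := hx
    obtain ⟨q, ⟨hq, hmatch⟩, hqb⟩ := hall p hp
    refine ⟨q, hq, ?_⟩
    simp only [Bool.and_eq_true, beq_iff_eq] at hmatch
    obtain ⟨h1, h2⟩ := hmatch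
    have : q.1.2 = base + p.1.2 := by omega
    rw [Prod.ext_iff, Prod.ext_iff]
    exact ⟨h1, this, h2⟩

-- ===== VERDICT (by name: the statement is the Claim_ definition above) =====
theorem is_subquery_spec : Claim_equal_is_subquery := by
  intro st si t i _
  exact is_subquery_eq_alt st si t i
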